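-- pv_equiv track=rewrite | github.com/Andrioskij/Periodic-Table-Of-Elements | src/domain/lewis_diagram.py | distribute_dots
-- ===== SOURCE A (Python) =====
-- _POSITIONS = ("top", "right", "bottom", "left")
--
-- def distribute_dots(valence_electrons: int) -> dict[str, int]:
--     """Distribute valence electrons across four positions around a symbol.
--
--     Fills one electron per position first (top → right → bottom → left),
--     then pairs starting from top again.  Each position holds 0, 1, or 2.
--
--     Returns ``{"top": n, "right": n, "bottom": n, "left": n}``.
--     """
--     result = {pos: 0 for pos in _POSITIONS}
--     remaining = max(0, min(valence_electrons, 8))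
--
--     # First pass: one electron per position
--     for pos in _POSITIONS:
--         if remaining <= 0:
--             break
--         result[pos] = 1
--         remaining -= 1
--
--     # Second pass: pair up
--     for pos in _POSITIONS:
--         if remaining <= 0:
--             break
--         result[pos] = 2
--         remaining -= 1
--
--     return result
-- ===== SOURCE B (Python) =====
-- _POSITIONS = ("top", "right", "bottom", "left")
--
-- def distribute_dots(valence_electrons: int) -> dict[str, int]:
--     """Closed-form per-position count: no mutating fill/pair passes."""
--     n = max(0, min(valence_electrons, 8))
--     return {pos: 2 if n >= i + 5 else 1 if n >= i + 1 else 0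
--             for i, pos in enumerate(_POSITIONS)}
-- ===== Notes on version B (the rewrite author's own statement) =====
-- stated objective: simpler
-- what changed: Replaces the two sequential mutate-and-decrement fill/pair passes over the dict with a single comprehension computing each position's count by a closed-form arithmetic rule from the clamped electron count and the position index.
import Mathlib
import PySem

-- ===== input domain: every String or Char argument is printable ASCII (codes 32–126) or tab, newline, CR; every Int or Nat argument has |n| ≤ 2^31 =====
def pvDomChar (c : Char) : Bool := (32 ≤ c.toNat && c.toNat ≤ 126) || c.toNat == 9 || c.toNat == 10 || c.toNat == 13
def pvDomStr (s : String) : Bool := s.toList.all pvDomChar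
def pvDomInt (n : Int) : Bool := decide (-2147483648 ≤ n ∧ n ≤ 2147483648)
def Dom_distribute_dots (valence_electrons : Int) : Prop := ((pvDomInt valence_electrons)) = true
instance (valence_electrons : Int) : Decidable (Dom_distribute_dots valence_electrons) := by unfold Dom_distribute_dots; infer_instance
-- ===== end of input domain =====

-- B replaces A's two mutate-and-decrement fill/pair passes with a closed-form count per position (simpler, same O(1) cost).

def pvPositions : List String := ["top", "right", "bottom", "left"]

-- ===== PORT A =====
-- literal transliteration: dict of zeros, clamp, then two break-guarded passes mutating (dict, remaining)
def distribute_dots (valence_electrons : Int) : List (String × Int) :=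
  let result : PySem.Dict String Int :=
    pvPositions.foldl (fun d pos => d.insert pos 0) PySem.Dict.empty
  let remaining : Int := max 0 (min valence_electrons 8)
  -- first pass: one electron per position (break when remaining ≤ 0)
  let st1 :=
    pvPositions.foldl (fun (st : PySem.Dict String Int × Int) pos =>
      if st.2 ≤ 0 then st else (st.1.insert pos 1, st.2 - 1)) (result, remaining)
  -- second pass: pair up
  let st2 :=
    pvPositions.foldl (fun (st : PySem.Dict String Int × Int) pos =>
      if st.2 ≤ 0 then st else (st.1.insert pos 2, st.2 - 1)) st1
  st2.1.items

-- ===== PORT B =====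
-- literal transliteration of Source B: clamp once, one comprehension with a closed-form value per indexed position
def distribute_dots_alt (valence_electrons : Int) : List (String × Int) :=
  let n : Int := max 0 (min valence_electrons 8)
  ((PySem.List.enumerate pvPositions).map
    (fun ip => (ip.2, if n ≥ ip.1 + 5 then (2 : Int) else if n ≥ ip.1 + 1 then 1 else 0)))

-- ===== PRECONDITION & SPEC =====
def Spec_distribute_dots (valence_electrons : Int) (out : List (String × Int)) : Prop := out = distribute_dots_alt valence_electrons
instance (valence_electrons : Int) (out : List (String × Int)) : Decidable (Spec_distribute_dots valence_electrons out) := by unfold Spec_distribute_dots; infer_instance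

-- ===== CLAIM (what is proved, stated in full; the proofs are below) =====
def Claim_equal_distribute_dots : Prop := ∀ (valence_electrons : Int), Dom_distribute_dots valence_electrons → Spec_distribute_dots valence_electrons (distribute_dots valence_electrons)

-- ===== LEMMAS AND PROOFS =====

-- Both ports depend on the input only through the clamp max 0 (min v 8) ∈ [0,8]: nine cases, each decided.
theorem distribute_dots_eq_alt (v : Int) : distribute_dots v = distribute_dots_alt v := by
  unfold distribute_dots distribute_dots_alt
  generalize h : max 0 (min v 8) = m
  have h0 : 0 ≤ m := by omega
  have h8 : m ≤ 8 := by omega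
  interval_cases m <;> decide

-- ===== VERDICT (by name: the statement is the Claim_ definition above) =====
theorem distribute_dots_spec : Claim_equal_distribute_dots := by
  intro v _
  exact distribute_dots_eq_alt v
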